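-- pv_equiv track=rewrite | github.com/erikhyrkas/snakes | ys/tokenizer/tokenizer_word_part.py | _detect_repeats
-- ===== SOURCE A (Python) =====
-- REPEAT_ARRAY = ['a', 'b', 'c', 'd', 'e', 'f', 'g', 'h', 'i']
--
-- def _detect_repeats(text):
--     repeats_replaced = ''
--     last_char = ''
--     repeat_count = 0
--
--     for char in text:
--         if (char.isspace() or not char.isalnum()) and char == last_char:
--             repeat_count += 1
--             if repeat_count == 10:
--                 # If repeat count reaches 10, insert a <repeat-10> token
--                 repeats_replaced += f"<repeati>{char}"
--                 repeat_count = 0  # Reset repeat count after inserting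
--         else:
--             if repeat_count > 1:
--                 repeat_letter = REPEAT_ARRAY[repeat_count - 2]
--                 repeats_replaced += f"<repeat{repeat_letter}>{last_char}"
--             elif repeat_count == 1:
--                 repeats_replaced += last_char
--             last_char = char
--             repeat_count = 1
--
--     # Append any remaining repeat count
--     if repeat_count > 1:
--         repeat_letter = REPEAT_ARRAY[repeat_count - 2]
--         repeats_replaced += f"<repeat{repeat_letter}>{last_char}"
--     elif repeat_count == 1:
--         repeats_replaced += last_char
--
--     return repeats_replaced
-- ===== SOURCE B (Python) =====
-- REPEAT_ARRAY = ['a', 'b', 'c', 'd', 'e', 'f', 'g', 'h', 'i']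
--
-- def _detect_repeats(text):
--     # Scan run-by-run: find each maximal run of one character, then emit its
--     # encoding in closed form (divmod by 10) instead of A's stateful counter.
--     parts = []
--     i = 0
--     n_text = len(text)
--     while i < n_text:
--         ch = text[i]
--         j = i + 1
--         while j < n_text and text[j] == ch:
--             j += 1
--         n = j - i
--         if ch.isalnum():
--             parts.append(ch * n)
--         else:
--             blocks, rem = divmod(n, 10)
--             parts.append(("<repeati>" + ch) * blocks)
--             if rem == 1:
--                 parts.append(ch)
--             elif rem > 1:
--                 parts.append("<repeat" + REPEAT_ARRAY[rem - 2] + ">" + ch)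
--         i = j
--     return ''.join(parts)
-- ===== Notes on version B (the rewrite author's own statement) =====
-- stated objective: alternative
-- what changed: A's single stateful pass with a running repeat counter and deferred flushes is replaced by a run-by-run scan that finds each maximal run of one character and emits its encoding in closed form via divmod(n, 10).
import Mathlib
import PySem

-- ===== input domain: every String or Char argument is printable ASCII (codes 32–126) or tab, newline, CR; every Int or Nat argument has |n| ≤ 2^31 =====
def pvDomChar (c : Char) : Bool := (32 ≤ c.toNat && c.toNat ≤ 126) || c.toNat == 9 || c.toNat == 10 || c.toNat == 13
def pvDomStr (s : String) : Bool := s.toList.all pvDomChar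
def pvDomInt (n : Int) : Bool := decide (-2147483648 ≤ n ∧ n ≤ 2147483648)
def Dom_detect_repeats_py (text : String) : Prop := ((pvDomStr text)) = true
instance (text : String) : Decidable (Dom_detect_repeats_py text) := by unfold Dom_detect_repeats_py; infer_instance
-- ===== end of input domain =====

-- B re-implements A's stateful counter loop as a run-by-run scan with a closed-form
-- (divmod by 10) encoding per run; objective: alternative decomposition, same cost.

-- ===== PORT A =====
def pvREPEAT_ARRAY : List Char := ['a', 'b', 'c', 'd', 'e', 'f', 'g', 'h', 'i']

-- the flush that A performs in its else-branch and after the loop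
-- (repeat_count is 0..9 whenever flushed, so REPEAT_ARRAY[cnt-2] is in range; .getD is unreachable)
def pvAFlush (last : List Char) (cnt : Nat) : List Char :=
  if cnt > 1 then
    "<repeat".toList ++ [(PySem.List.pyGet? pvREPEAT_ARRAY ((cnt : Int) - 2)).getD 'a'] ++ ['>'] ++ last
  else if cnt == 1 then last else []

-- A's loop body; state = (repeats_replaced, last_char, repeat_count)
def pvAStep (s : List Char × List Char × Nat) (c : Char) : List Char × List Char × Nat :=
  let (acc, last, cnt) := s
  if (PySem.Chars.isspace c || !(PySem.Chars.isalnum c)) && ([c] == last) then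
    if cnt + 1 == 10 then (acc ++ "<repeati>".toList ++ [c], last, 0)
    else (acc, last, cnt + 1)
  else
    (acc ++ pvAFlush last cnt, [c], 1)

def detect_repeats_py (text : String) : String :=
  let s := text.toList.foldl pvAStep ([], [], 0)
  String.mk (s.1 ++ pvAFlush s.2.1 s.2.2)

-- ===== PORT B =====
-- encoding of one maximal run of n copies of c (Source B's loop body)
def pvBRun (c : Char) (n : Nat) : List Char :=
  if PySem.Chars.isalnum c then List.replicate n c
  else
    let blocks := n / 10
    let rem := n % 10
    (List.replicate blocks ("<repeati>".toList ++ [c])).flatten ++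
    (if rem == 1 then [c]
     else if rem > 1 then
       "<repeat".toList ++ [(PySem.List.pyGet? pvREPEAT_ARRAY ((rem : Int) - 2)).getD 'a'] ++ ['>', c]
     else [])

-- Source B's outer while-loop: peel one maximal run at a time
def pvBGo : List Char → List Char
  | [] => []
  | c :: rest =>
    pvBRun c ((rest.takeWhile (· == c)).length + 1) ++ pvBGo (rest.dropWhile (· == c))
termination_by l => l.length
decreasing_by
  simpa using Nat.lt_succ_of_le (List.length_dropWhile_le (· == c) rest)

def detect_repeats_py_alt (text : String) : String :=
  String.mk (pvBGo text.toList)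

-- ===== PRECONDITION & SPEC =====
def Spec_detect_repeats_py (text : String) (out : String) : Prop := out = detect_repeats_py_alt text
instance (text : String) (out : String) : Decidable (Spec_detect_repeats_py text out) := by unfold Spec_detect_repeats_py; infer_instance

-- ===== CLAIM (what is proved, stated in full; the proofs are below) =====
def Claim_equal_detect_repeats_py : Prop := ∀ (text : String), Dom_detect_repeats_py text → Spec_detect_repeats_py text (detect_repeats_py text)

-- ===== LEMMAS AND PROOFS =====

-- whitespace is never alnum
theorem pv_isspace_not_alnum (c : Char) (hs : PySem.Chars.isspace c = true) :
    PySem.Chars.isalnum c = false := by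
  simp only [PySem.Chars.isspace, Char.toNat, Bool.or_eq_true, Bool.and_eq_true,
        decide_eq_true_eq] at hs
  simp only [PySem.Chars.isalnum, PySem.Chars.isalpha, PySem.Chars.isdigit,
        PySem.Chars.isupper, PySem.Chars.islower, Char.le_def, UInt32.le_iff_toNat_le,
        Bool.or_eq_false_iff, Bool.and_eq_false_iff, decide_eq_false_iff_not, not_le,
        show 'A'.val.toNat = 65 from rfl, show 'Z'.val.toNat = 90 from rfl,
        show 'a'.val.toNat = 97 from rfl, show 'z'.val.toNat = 122 from rfl,
        show '0'.val.toNat = 48 from rfl, show '9'.val.toNat = 57 from rfl]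
  omega

-- accumulating within a non-alnum run
theorem pv_run_nonalnum (c : Char) (hc : PySem.Chars.isalnum c = false) :
    ∀ (j : Nat) (acc : List Char) (cnt : Nat), cnt < 10 →
      (List.replicate j c).foldl pvAStep (acc, [c], cnt) =
        (acc ++ (List.replicate ((cnt + j) / 10) ("<repeati>".toList ++ [c])).flatten,
         [c], (cnt + j) % 10) := by
  intro j
  induction j with
  | zero =>
    intro acc cnt hcnt
    simp [Nat.div_eq_of_lt hcnt, Nat.mod_eq_of_lt hcnt]
  | succ j ih =>
    intro acc cnt hcnt
    rw [List.replicate_succ, List.foldl_cons]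
    by_cases h9 : cnt = 9
    · subst h9
      have hstep : pvAStep (acc, [c], 9) c = (acc ++ "<repeati>".toList ++ [c], [c], 0) := by
        simp [pvAStep, hc]
      rw [hstep, ih _ 0 (by norm_num)]
      have h1 : (9 + (j + 1)) / 10 = (0 + j) / 10 + 1 := by omega
      have h2 : (9 + (j + 1)) % 10 = (0 + j) % 10 := by omega
      rw [h1, h2, List.replicate_succ, List.flatten_cons]
      simp
    · have hstep : pvAStep (acc, [c], cnt) c = (acc, [c], cnt + 1) := by
        simp [pvAStep, hc]
        omega
      rw [hstep, ih _ (cnt + 1) (by omega)]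
      have h1 : cnt + 1 + j = cnt + (j + 1) := by omega
      rw [h1]

-- accumulating within an alnum run
theorem pv_run_alnum (c : Char) (hc : PySem.Chars.isalnum c = true) :
    ∀ (j : Nat) (acc : List Char),
      (List.replicate j c).foldl pvAStep (acc, [c], 1) =
        (acc ++ List.replicate j c, [c], 1) := by
  intro j
  induction j with
  | zero => simp
  | succ j ih =>
    intro acc
    rw [List.replicate_succ, List.foldl_cons]
    have hsp : PySem.Chars.isspace c = false := by
      cases h : PySem.Chars.isspace c
      · rfl
      · exact absurd hc (by simp [pv_isspace_not_alnum c h])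
    have hstep : pvAStep (acc, [c], 1) c = (acc ++ [c], [c], 1) := by
      simp [pvAStep, hsp, hc, pvAFlush]
    rw [hstep, ih]
    simp

-- pvBRun of a non-alnum run is A's blocks followed by A's final flush
theorem pv_bRun_nonalnum (c : Char) (hc : PySem.Chars.isalnum c = false) (n : Nat) :
    pvBRun c n =
      (List.replicate (n / 10) ("<repeati>".toList ++ [c])).flatten ++ pvAFlush [c] (n % 10) := by
  simp only [pvBRun, pvAFlush, hc, Bool.false_eq_true, if_false]
  have h10 : n % 10 < 10 := Nat.mod_lt _ (by norm_num)
  split_ifs <;> simp_all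

-- main invariant: at a run boundary, finishing A's fold equals acc ++ flush ++ B's output
theorem pv_main (l : List Char) :
    ∀ (acc last : List Char) (cnt : Nat),
      (∀ c, l.head? = some c →
        ((PySem.Chars.isspace c || !(PySem.Chars.isalnum c)) && ([c] == last)) = false) →
      (let s := l.foldl pvAStep (acc, last, cnt); s.1 ++ pvAFlush s.2.1 s.2.2) =
        acc ++ pvAFlush last cnt ++ pvBGo l := by
  induction hn : l.length using Nat.strong_induction_on generalizing l with
  | _ n IH =>
  intro acc last cnt hb
  match l, hn with
  | [], _ => simp [pvBGo]
  | c :: rest, hn =>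
    dsimp only
    rw [List.foldl_cons]
    have hstep : pvAStep (acc, last, cnt) c = (acc ++ pvAFlush last cnt, [c], 1) := by
      have hcond := hb c rfl
      simp only [pvAStep, hcond, Bool.false_eq_true, if_false]
    rw [hstep]
    have htw : rest.takeWhile (· == c) = List.replicate (rest.takeWhile (· == c)).length c := by
      apply List.eq_replicate_length.mpr
      intro b hbm
      have := List.mem_takeWhile_imp hbm
      simpa using this
    have hdecomp : rest = List.replicate (rest.takeWhile (· == c)).length c ++ rest.dropWhile (· == c) := by
      conv_lhs => rw [← List.takeWhile_append_dropWhile (p := (· == c)) (l := rest)]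
      rw [← htw]
    have hlen : (rest.dropWhile (· == c)).length < n := by
      have := List.length_dropWhile_le (· == c) rest
      simp at hn
      omega
    have hb' : ∀ d, (rest.dropWhile (· == c)).head? = some d →
        ((PySem.Chars.isspace d || !(PySem.Chars.isalnum d)) && ([d] == [c])) = false := by
      intro d hd
      have hnd := List.head?_dropWhile_not (· == c) rest
      rw [hd] at hnd
      simp only at hnd
      simp [show d ≠ c by simpa using hnd]
    have hgo : pvBGo (c :: rest) =
        pvBRun c ((rest.takeWhile (· == c)).length + 1) ++ pvBGo (rest.dropWhile (· == c)) := by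
      rw [pvBGo]
    conv_lhs => rw [hdecomp]
    rw [List.foldl_append, hgo]
    by_cases hal : PySem.Chars.isalnum c = true
    · rw [pv_run_alnum c hal]
      rw [IH _ hlen _ rfl _ _ _ hb']
      simp only [pvBRun, hal, if_true, pvAFlush]
      rw [List.replicate_succ' (n := (rest.takeWhile (· == c)).length) (a := c)]
      simp
    · have hal' : PySem.Chars.isalnum c = false := by simpa using hal
      rw [pv_run_nonalnum c hal' _ _ 1 (by norm_num)]
      rw [IH _ hlen _ rfl _ _ _ hb']
      rw [pv_bRun_nonalnum c hal']
      have h1 : 1 + (rest.takeWhile (· == c)).length = (rest.takeWhile (· == c)).length + 1 := by omega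
      rw [h1]
      simp

-- ===== VERDICT (by name: the statement is the Claim_ definition above) =====
theorem detect_repeats_py_spec : Claim_equal_detect_repeats_py := by
  intro text _
  unfold Spec_detect_repeats_py detect_repeats_py detect_repeats_py_alt
  have h := pv_main text.toList [] [] 0 (by intro c _; simp)
  simp only [] at h ⊢
  rw [h]
  simp [pvAFlush]
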